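-- pv_equiv track=rewrite | github.com/liupengsay/PyIsTheBestLang | src/basis/meet_in_middle/problem.py | lc_956_1
-- ===== SOURCE A (Python) =====
-- from collections import defaultdict, Counter
-- from typing import List
--
-- def lc_956_1(rods: List[int]) -> int:
--     """
--     url: https://leetcode.cn/problems/tallest-billboard/description/
--     tag: meet_in_middle|dp
--     """
--
--     def check(lst):
--         cur = {(0, 0)}
--         for num in lst:
--             cur |= {(a + num, b) for a, b in cur} | {(a, b + num) for a, b in cur}
--         dct = defaultdict(int)
--         for a, b in cur:
--             dct[a - b] = max(dct[a - b], a)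
--         return dct
--
--     m = len(rods)
--     pre = check(rods[:m // 2])
--     post = check(rods[m // 2:])
--     ans = 0
--     for k in pre:
--         if -k in post:
--             ans = max(ans, pre[k] + post[-k])
--     return ans
-- ===== SOURCE B (Python) =====
-- from typing import List
--
-- def lc_956_1(rods: List[int]) -> int:
--     # Per-half DP over the height difference (dp[diff] = max taller-side height),
--     # replacing A's explicit enumeration of all 3^(n/2) pile pairs per half.
--     def best(lst):
--         dp = {0: 0}
--         for num in lst:
--             nxt = dict(dp)
--             for d, v in dp.items():
--                 if d + num not in nxt or nxt[d + num] < v + num: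
--                     nxt[d + num] = v + num
--                 if d - num not in nxt or nxt[d - num] < v:
--                     nxt[d - num] = v
--             dp = nxt
--         return {d: max(v, 0) for d, v in dp.items()}  # reported height is never below 0
--
--     m = len(rods)
--     left = best(rods[:m // 2])
--     right = best(rods[m // 2:])
--     ans = 0
--     for d, v in left.items():
--         if -d in right:
--             ans = max(ans, v + right[-d])
--     return ans
-- ===== Notes on version B (the rewrite author's own statement) =====
-- stated objective: faster
-- what changed: Each half's table is built by dynamic programming over achievable height differences (dict diff -> max taller-side height, relaxed once per rod) instead of materialising the full set of 3^(n/2) (tall, short) pile pairs and reducing it afterwards; the half split and the key/-key combination step are unchanged.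
import Mathlib
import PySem

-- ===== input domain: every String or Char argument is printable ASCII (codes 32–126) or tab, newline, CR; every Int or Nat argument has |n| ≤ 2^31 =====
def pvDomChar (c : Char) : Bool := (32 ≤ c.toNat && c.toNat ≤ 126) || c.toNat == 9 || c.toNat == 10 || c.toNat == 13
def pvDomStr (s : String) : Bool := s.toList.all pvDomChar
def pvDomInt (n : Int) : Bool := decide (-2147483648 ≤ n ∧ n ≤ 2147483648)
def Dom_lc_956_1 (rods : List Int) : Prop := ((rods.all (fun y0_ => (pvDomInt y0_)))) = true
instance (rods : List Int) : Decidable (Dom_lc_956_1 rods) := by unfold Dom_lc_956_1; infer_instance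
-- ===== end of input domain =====

-- B replaces A's explicit enumeration of all 3^(n/2) pile pairs per half by a per-half DP over the
-- height difference (dict diff -> max taller-side height); same split and combination, same values.

-- ===== PORT A =====
-- cur |= {(a+num, b) for a, b in cur} | {(a, b+num) for a, b in cur}
def lc956CurStep (cur : PySem.Set (Int × Int)) (num : Int) : PySem.Set (Int × Int) :=
  PySem.Set.union cur
    (PySem.Set.union (PySem.Set.ofList (cur.map (fun p => (p.1 + num, p.2))))
      (PySem.Set.ofList (cur.map (fun p => (p.1, p.2 + num)))))

-- def check(lst): builds the set cur, then dct[a-b] = max(dct[a-b], a)  (defaultdict(int): first read is 0)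
def lc956Check (lst : List Int) : PySem.Dict Int Int :=
  let cur := lst.foldl lc956CurStep (PySem.Set.ofList [((0 : Int), (0 : Int))])
  cur.foldl (fun d p => d.insert (p.1 - p.2) (max (d.getD (p.1 - p.2) 0) p.1)) PySem.Dict.empty

def lc_956_1 (rods : List Int) : Int :=
  let m : Int := rods.length
  let pre := lc956Check (PySem.List.slice rods none (some (PySem.Int.floordiv m 2)))
  let post := lc956Check (PySem.List.slice rods (some (PySem.Int.floordiv m 2)) none)
  pre.keys.foldl (fun ans k =>
    if post.contains (-k) then max ans (pre.getD k 0 + post.getD (-k) 0) else ans) 0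

-- ===== PORT B =====
-- for d, v in dp.items(): relax nxt[d+num] with v+num and nxt[d-num] with v (keep the larger)
def lc956BestStep (dp : PySem.Dict Int Int) (num : Int) : PySem.Dict Int Int :=
  dp.items.foldl (fun nxt dv =>
    let n1 := if !nxt.contains (dv.1 + num) || nxt.getD (dv.1 + num) 0 < dv.2 + num
              then nxt.insert (dv.1 + num) (dv.2 + num) else nxt
    if !n1.contains (dv.1 - num) || n1.getD (dv.1 - num) 0 < dv.2
    then n1.insert (dv.1 - num) dv.2 else n1) dp

-- def best(lst): dp = {0: 0}; relax per rod; finally {d: max(v, 0) for d, v in dp.items()}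
def lc956Best (lst : List Int) : PySem.Dict Int Int :=
  let dp := lst.foldl lc956BestStep (PySem.Dict.empty.insert 0 0)
  dp.items.foldl (fun r dv => r.insert dv.1 (max dv.2 0)) PySem.Dict.empty

def lc_956_1_alt (rods : List Int) : Int :=
  let m : Int := rods.length
  let left := lc956Best (PySem.List.slice rods none (some (PySem.Int.floordiv m 2)))
  let right := lc956Best (PySem.List.slice rods (some (PySem.Int.floordiv m 2)) none)
  left.items.foldl (fun ans dv =>
    match right.get? (-dv.1) with
    | some w => max ans (dv.2 + w)
    | none => ans) 0

-- ===== PRECONDITION & SPEC =====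
def Spec_lc_956_1 (rods : List Int) (out : Int) : Prop := out = lc_956_1_alt rods
instance (rods : List Int) (out : Int) : Decidable (Spec_lc_956_1 rods out) := by unfold Spec_lc_956_1; infer_instance

-- ===== CLAIM (what is proved, stated in full; the proofs are below) =====
def Claim_equal_lc_956_1 : Prop := ∀ (rods : List Int), Dom_lc_956_1 rods → Spec_lc_956_1 rods (lc_956_1 rods)

-- ===== LEMMAS AND PROOFS =====

-- optional max: the merge of "best value so far" options
def pvOmax (a b : Option Int) : Option Int :=
  match a, b with
  | none, b => b
  | some x, none => some x
  | some x, some y => some (max x y)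

def pvOmaxL (l : List Int) : Option Int :=
  l.foldl (fun o x => pvOmax o (some x)) none

-- the multiset of reachable (tall, short) pile pairs of a list of rods
def pvReach (lst : List Int) : List (Int × Int) :=
  lst.foldl (fun acc num => acc.flatMap (fun p => [p, (p.1 + num, p.2), (p.1, p.2 + num)])) [(0, 0)]

-- first components of the pairs whose difference is k
def pvMset (ps : List (Int × Int)) (k : Int) : List Int :=
  (ps.filter (fun p => p.1 - p.2 == k)).map Prod.fst

theorem pvOmax_none_right (a : Option Int) : pvOmax a none = a := by
  cases a <;> rfl

theorem pvOmax_none_left (b : Option Int) : pvOmax none b = b := rfl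

theorem pvOmax_assoc (a b c : Option Int) : pvOmax (pvOmax a b) c = pvOmax a (pvOmax b c) := by
  cases a <;> cases b <;> cases c <;> simp [pvOmax, max_assoc]

theorem pvOmaxL_go (l : List Int) (o : Option Int) :
    l.foldl (fun o x => pvOmax o (some x)) o = pvOmax o (pvOmaxL l) := by
  induction l generalizing o with
  | nil => simp [pvOmaxL, pvOmax_none_right]
  | cons x t ih =>
    show List.foldl _ (pvOmax o (some x)) t = _
    rw [ih]
    conv_rhs => rw [pvOmaxL, List.foldl_cons, ih (pvOmax none (some x))]
    rw [← pvOmax_assoc, ← pvOmax_assoc, pvOmax_none_right]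

theorem pvOmaxL_append (l₁ l₂ : List Int) :
    pvOmaxL (l₁ ++ l₂) = pvOmax (pvOmaxL l₁) (pvOmaxL l₂) := by
  rw [pvOmaxL, List.foldl_append, ← pvOmaxL, pvOmaxL_go]

theorem pvOmaxL_le (l : List Int) (x : Int) (hx : x ∈ l) :
    ∃ M, pvOmaxL l = some M ∧ x ≤ M := by
  induction l with
  | nil => cases hx
  | cons y t ih =>
    have hstep : pvOmaxL (y :: t) = pvOmax (some y) (pvOmaxL t) := by
      rw [pvOmaxL, List.foldl_cons, pvOmaxL_go]; rfl
    rcases List.mem_cons.mp hx with h | h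
    · subst h
      cases hmt : pvOmaxL t with
      | none => exact ⟨x, by rw [hstep, hmt]; rfl, le_refl x⟩
      | some M => exact ⟨max x M, by rw [hstep, hmt]; rfl, le_max_left _ _⟩
    · obtain ⟨M, hM, hxM⟩ := ih h
      exact ⟨max y M, by rw [hstep, hM]; rfl, le_trans hxM (le_max_right _ _)⟩

theorem pvOmaxL_mem (l : List Int) (M : Int) (h : pvOmaxL l = some M) : M ∈ l := by
  induction l generalizing M with
  | nil => simp [pvOmaxL] at h
  | cons y t ih =>
    have hstep : pvOmaxL (y :: t) = pvOmax (some y) (pvOmaxL t) := by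
      rw [pvOmaxL, List.foldl_cons, pvOmaxL_go]; rfl
    rw [hstep] at h
    cases hmt : pvOmaxL t with
    | none => rw [hmt] at h; simp [pvOmax] at h; simp [h]
    | some N =>
      rw [hmt] at h
      simp only [pvOmax, Option.some.injEq] at h
      rcases max_choice y N with hc | hc
      · simp [← h, hc]
      · rw [← h, hc]
        exact List.mem_cons_of_mem _ (ih N hmt)

theorem pvOmaxL_eq_of_mem_iff (l₁ l₂ : List Int) (h : ∀ x, x ∈ l₁ ↔ x ∈ l₂) :
    pvOmaxL l₁ = pvOmaxL l₂ := by
  cases h1 : pvOmaxL l₁ with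
  | none =>
    cases h2 : pvOmaxL l₂ with
    | none => rfl
    | some M =>
      obtain ⟨M', hM', _⟩ := pvOmaxL_le l₁ M ((h M).mpr (pvOmaxL_mem l₂ M h2))
      rw [h1] at hM'; cases hM'
  | some M =>
    cases h2 : pvOmaxL l₂ with
    | none =>
      obtain ⟨M', hM', _⟩ := pvOmaxL_le l₂ M ((h M).mp (pvOmaxL_mem l₁ M h1))
      rw [h2] at hM'; cases hM'
    | some N =>
      obtain ⟨N', hN', hMN⟩ := pvOmaxL_le l₂ M ((h M).mp (pvOmaxL_mem l₁ M h1))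
      obtain ⟨M', hM', hNM⟩ := pvOmaxL_le l₁ N ((h N).mpr (pvOmaxL_mem l₂ N h2))
      rw [h2] at hN'; rw [h1] at hM'
      cases hN'; cases hM'
      exact congrArg some (le_antisymm hMN hNM)


theorem pvMset_mem (ps : List (Int × Int)) (k x : Int) :
    x ∈ pvMset ps k ↔ ∃ p ∈ ps, p.1 - p.2 = k ∧ p.1 = x := by
  simp only [pvMset, List.mem_map, List.mem_filter, beq_iff_eq]
  aesop

theorem pvMset_single (q : Int × Int) (e : Int) :
    pvMset [q] e = if q.1 - q.2 = e then [q.1] else [] := by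
  by_cases h : q.1 - q.2 = e <;> simp [pvMset, h]

theorem pvMset_append (ps : List (Int × Int)) (y : Int × Int) (k : Int) :
    pvMset (ps ++ [y]) k = pvMset ps k ++ (if y.1 - y.2 = k then [y.1] else []) := by
  simp only [pvMset, List.filter_append, List.map_append]
  congr 1
  by_cases h : y.1 - y.2 = k <;> simp [h]

theorem mem_fold_cur (lst : List Int) (s : PySem.Set (Int × Int)) (r : List (Int × Int))
    (h : ∀ p, p ∈ s ↔ p ∈ r) (p : Int × Int) :
    p ∈ lst.foldl lc956CurStep s ↔
      p ∈ lst.foldl (fun acc num => acc.flatMap (fun q => [q, (q.1 + num, q.2), (q.1, q.2 + num)])) r := by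
  induction lst generalizing s r with
  | nil => simpa using h p
  | cons num t ih =>
    simp only [List.foldl_cons]
    apply ih
    intro q
    simp only [lc956CurStep, PySem.Set.mem_union, PySem.Set.mem_ofList, List.mem_map,
      List.mem_flatMap, List.mem_cons, h]
    aesop

theorem dctFold_get? (ps : List (Int × Int)) (k : Int) :
    (ps.foldl (fun d p => d.insert (p.1 - p.2) (max (d.getD (p.1 - p.2) 0) p.1))
        PySem.Dict.empty).get? k
      = (pvOmaxL (pvMset ps k)).map (fun M => max 0 M) := by
  induction ps using List.reverseRecOn with
  | nil => simp [pvMset, pvOmaxL, PySem.Dict.get?_empty]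
  | append_singleton l y ih =>
    rw [List.foldl_append, List.foldl_cons, List.foldl_nil, PySem.Dict.get?_insert]
    have hy : pvOmaxL [y.1] = some y.1 := rfl
    by_cases hk : k = y.1 - y.2
    · subst hk
      rw [if_pos rfl, PySem.Dict.getD_eq_get?_getD, ih, pvMset_append, pvOmaxL_append,
        if_pos rfl, hy]
      cases hm : pvOmaxL (pvMset l (y.1 - y.2)) with
      | none => simp [pvOmax]
      | some M => simp [pvOmax, max_assoc]
    · rw [if_neg hk, ih, pvMset_append, pvOmaxL_append, if_neg (by omega)]
      simp [pvOmaxL, pvOmax_none_right]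

theorem check_get? (lst : List Int) (k : Int) :
    (lc956Check lst).get? k = (pvOmaxL (pvMset (pvReach lst) k)).map (fun M => max 0 M) := by
  unfold lc956Check
  rw [dctFold_get?]
  congr 1
  apply pvOmaxL_eq_of_mem_iff
  intro x
  rw [pvMset_mem, pvMset_mem, pvReach]
  have hbase : ∀ q : Int × Int,
      q ∈ PySem.Set.ofList [((0 : Int), (0 : Int))] ↔ q ∈ [((0 : Int), (0 : Int))] :=
    fun q => PySem.Set.mem_ofList _ q
  constructor <;> rintro ⟨p, hp, hk, hx⟩ <;> refine ⟨p, ?_, hk, hx⟩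
  · exact (mem_fold_cur lst _ _ hbase p).mp hp
  · exact (mem_fold_cur lst _ _ hbase p).mpr hp

theorem pvOmax_comm (a b : Option Int) : pvOmax a b = pvOmax b a := by
  cases a <;> cases b <;> simp [pvOmax, max_comm]

theorem pvOmax_left_comm (a b c : Option Int) :
    pvOmax a (pvOmax b c) = pvOmax b (pvOmax a c) := by
  rw [← pvOmax_assoc, pvOmax_comm a b, pvOmax_assoc]

theorem pvUpd_get? (d : PySem.Dict Int Int) (key val e : Int) :
    ((if !d.contains key || d.getD key 0 < val then d.insert key val else d).get? e)
      = if key = e then pvOmax (d.get? e) (some val) else d.get? e := by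
  by_cases hk : key = e
  · subst hk
    rw [if_pos rfl]
    split_ifs with hc
    · rw [PySem.Dict.get?_insert_self]
      simp only [Bool.or_eq_true, Bool.not_eq_eq_eq_not, Bool.not_true, decide_eq_true_eq,
        PySem.Dict.contains_eq_isSome_get?, PySem.Dict.getD_eq_get?_getD] at hc
      cases hd : d.get? key with
      | none => rfl
      | some v =>
        rw [hd] at hc
        simp only [Option.isSome_some, Option.getD_some] at hc
        rcases hc with hc | hc
        · cases hc
        · simp [pvOmax, max_eq_right (le_of_lt hc)]
    · simp only [Bool.or_eq_true, Bool.not_eq_eq_eq_not, Bool.not_true, decide_eq_true_eq,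
        PySem.Dict.contains_eq_isSome_get?, PySem.Dict.getD_eq_get?_getD, not_or, not_lt] at hc
      obtain ⟨h1, h2⟩ := hc
      cases hd : d.get? key with
      | none => rw [hd] at h1; simp at h1
      | some v =>
        rw [hd] at h2
        simp only [Option.getD_some] at h2
        simp [pvOmax, max_eq_left h2]
  · rw [if_neg hk]
    split_ifs with hc
    · rw [PySem.Dict.get?_insert, if_neg (fun h => hk h.symm)]
    · rfl

theorem bestStep_fold_get? (l : List (Int × Int)) (nxt : PySem.Dict Int Int) (num e : Int) :
    ((l.foldl (fun nxt dv =>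
        let n1 := if !nxt.contains (dv.1 + num) || nxt.getD (dv.1 + num) 0 < dv.2 + num
                  then nxt.insert (dv.1 + num) (dv.2 + num) else nxt
        if !n1.contains (dv.1 - num) || n1.getD (dv.1 - num) 0 < dv.2
        then n1.insert (dv.1 - num) dv.2 else n1) nxt).get? e)
      = pvOmax (nxt.get? e)
          (pvOmaxL (l.flatMap (fun dv =>
            (if dv.1 + num = e then [dv.2 + num] else []) ++
            (if dv.1 - num = e then [dv.2] else [])))) := by
  induction l generalizing nxt with
  | nil => simp [pvOmaxL, pvOmax_none_right]
  | cons dv t ih =>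
    rw [List.foldl_cons, ih, List.flatMap_cons, pvOmaxL_append, pvOmaxL_append]
    have h1 := pvUpd_get? nxt (dv.1 + num) (dv.2 + num) e
    set n1 := if !nxt.contains (dv.1 + num) || nxt.getD (dv.1 + num) 0 < dv.2 + num
              then nxt.insert (dv.1 + num) (dv.2 + num) else nxt with hn1
    have h2 := pvUpd_get? n1 (dv.1 - num) dv.2 e
    show pvOmax ((if !n1.contains (dv.1 - num) || n1.getD (dv.1 - num) 0 < dv.2
        then n1.insert (dv.1 - num) dv.2 else n1).get? e) _ = _
    rw [h2, h1]
    by_cases ha : dv.1 + num = e <;> by_cases hb : dv.1 - num = e <;>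
      simp only [ha, hb] <;>
      simp [pvOmaxL, pvOmax_none_left, pvOmax_none_right, pvOmax_assoc]

theorem flatMap_key_none (l : List (Int × Int)) (k : Int) (g : Int → Int)
    (h : k ∉ l.map Prod.fst) :
    l.flatMap (fun dv => if dv.1 = k then [g dv.2] else []) = [] := by
  induction l with
  | nil => rfl
  | cons dv t ih =>
    simp only [List.map_cons, List.mem_cons, not_or] at h
    rw [List.flatMap_cons, if_neg (fun hc => h.1 hc.symm), List.nil_append, ih h.2]

theorem flatMap_key_single (l : List (Int × Int)) (hn : (l.map Prod.fst).Nodup)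
    (k v : Int) (g : Int → Int) (hm : (k, v) ∈ l) :
    l.flatMap (fun dv => if dv.1 = k then [g dv.2] else []) = [g v] := by
  induction l with
  | nil => cases hm
  | cons dv t ih =>
    rw [List.map_cons, List.nodup_cons] at hn
    rcases List.mem_cons.mp hm with h | h
    · subst h
      rw [List.flatMap_cons, if_pos rfl, flatMap_key_none t k g hn.1, List.append_nil]
    · have hkmem : k ∈ t.map Prod.fst := List.mem_map.mpr ⟨(k, v), h, rfl⟩
      have hne : dv.1 ≠ k := fun hc => hn.1 (by rw [hc]; exact hkmem)
      rw [List.flatMap_cons, if_neg hne, List.nil_append, ih hn.2 h]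

theorem dict_flatMap_key (dp : PySem.Dict Int Int) (hn : dp.keys.Nodup) (k : Int) (g : Int → Int) :
    pvOmaxL (dp.items.flatMap (fun dv => if dv.1 = k then [g dv.2] else []))
      = (dp.get? k).map g := by
  cases h : dp.get? k with
  | none =>
    rw [flatMap_key_none dp.items k g
      (by rw [PySem.Dict.get?_eq_none_iff_not_mem_keys] at h; exact h)]
    rfl
  | some v =>
    rw [flatMap_key_single dp.items hn k v g
      ((PySem.Dict.get?_eq_some_iff_mem_items dp k v hn).mp h)]
    rfl

theorem pvOmaxL_flatMap_append (l : List (Int × Int)) (f g : Int × Int → List Int) :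
    pvOmaxL (l.flatMap (fun dv => f dv ++ g dv))
      = pvOmax (pvOmaxL (l.flatMap f)) (pvOmaxL (l.flatMap g)) := by
  induction l with
  | nil => rfl
  | cons dv t ih =>
    simp only [List.flatMap_cons, pvOmaxL_append, ih]
    rw [pvOmax_assoc, pvOmax_assoc]
    congr 1
    rw [pvOmax_left_comm]

theorem dict_flatMap_key_id (dp : PySem.Dict Int Int) (hn : dp.keys.Nodup) (k : Int) :
    pvOmaxL (dp.items.flatMap (fun dv => if dv.1 = k then [dv.2] else []))
      = dp.get? k := by
  have h := dict_flatMap_key dp hn k (fun v => v)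
  simpa using h

theorem bestStep_get? (dp : PySem.Dict Int Int) (hn : dp.keys.Nodup) (num e : Int) :
    (lc956BestStep dp num).get? e
      = pvOmax (dp.get? e)
          (pvOmax ((dp.get? (e - num)).map (· + num)) (dp.get? (e + num))) := by
  unfold lc956BestStep
  rw [bestStep_fold_get?]
  congr 1
  have hfun : (fun dv : Int × Int =>
      (if dv.1 + num = e then [dv.2 + num] else []) ++
      (if dv.1 - num = e then [dv.2] else []))
      = (fun dv : Int × Int =>
      (if dv.1 = e - num then [dv.2 + num] else []) ++
      (if dv.1 = e + num then [dv.2] else [])) := by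
    funext dv
    congr 1
    · exact if_congr (by omega) rfl rfl
    · exact if_congr (by omega) rfl rfl
  rw [hfun, pvOmaxL_flatMap_append, dict_flatMap_key dp hn (e - num) (· + num),
    dict_flatMap_key_id dp hn (e + num)]

theorem foldStep_nodup (num : Int) (l : List (Int × Int)) :
    ∀ (d : PySem.Dict Int Int), d.keys.Nodup →
    ((l.foldl (fun nxt dv =>
        let n1 := if !nxt.contains (dv.1 + num) || nxt.getD (dv.1 + num) 0 < dv.2 + num
                  then nxt.insert (dv.1 + num) (dv.2 + num) else nxt
        if !n1.contains (dv.1 - num) || n1.getD (dv.1 - num) 0 < dv.2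
        then n1.insert (dv.1 - num) dv.2 else n1) d).keys.Nodup) := by
  induction l with
  | nil => intro d hd; exact hd
  | cons dv t ih =>
    intro d hd
    rw [List.foldl_cons]
    apply ih
    dsimp only
    have h1 : (if !d.contains (dv.1 + num) || d.getD (dv.1 + num) 0 < dv.2 + num
        then d.insert (dv.1 + num) (dv.2 + num) else d).keys.Nodup := by
      split_ifs with h
      · exact PySem.Dict.nodup_keys_insert _ _ _ hd
      · exact hd
    split_ifs with h h'
    all_goals first
      | exact PySem.Dict.nodup_keys_insert _ _ _ (PySem.Dict.nodup_keys_insert _ _ _ hd)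
      | exact PySem.Dict.nodup_keys_insert _ _ _ hd
      | exact hd

theorem bestStep_nodup (dp : PySem.Dict Int Int) (num : Int) (hn : dp.keys.Nodup) :
    (lc956BestStep dp num).keys.Nodup := by
  unfold lc956BestStep
  exact foldStep_nodup num dp.items dp hn


theorem pvMset_app (a b : List (Int × Int)) (k : Int) :
    pvMset (a ++ b) k = pvMset a k ++ pvMset b k := by
  simp [pvMset, List.filter_append]

theorem pvMset_flatMap (l : List (Int × Int)) (f : Int × Int → List (Int × Int)) (k : Int) :
    pvMset (l.flatMap f) k = l.flatMap (fun p => pvMset (f p) k) := by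
  induction l with
  | nil => rfl
  | cons p t ih => rw [List.flatMap_cons, List.flatMap_cons, pvMset_app, ih]

theorem flatMap_ite_eq_map_mset (r : List (Int × Int)) (k : Int) (g : Int → Int) :
    r.flatMap (fun p => if p.1 - p.2 = k then [g p.1] else []) = (pvMset r k).map g := by
  induction r with
  | nil => rfl
  | cons p t ih =>
    rw [List.flatMap_cons, ih]
    by_cases h : p.1 - p.2 = k
    · rw [if_pos h]
      simp [pvMset, h]
    · rw [if_neg h]
      simp [pvMset, h]

theorem pvOmaxL_map_add (l : List Int) (c : Int) :
    pvOmaxL (l.map (· + c)) = (pvOmaxL l).map (· + c) := by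
  induction l using List.reverseRecOn with
  | nil => rfl
  | append_singleton t x ih =>
    rw [List.map_append, pvOmaxL_append, pvOmaxL_append, ih]
    cases pvOmaxL t with
    | none => rfl
    | some M => simp [pvOmax, pvOmaxL, max_add_add_right]

theorem reach_mset_step (r : List (Int × Int)) (num e : Int) :
    pvOmaxL (pvMset (r.flatMap (fun p => [p, (p.1 + num, p.2), (p.1, p.2 + num)])) e)
      = pvOmax (pvOmaxL (pvMset r e))
          (pvOmax ((pvOmaxL (pvMset r (e - num))).map (· + num))
            (pvOmaxL (pvMset r (e + num)))) := by
  rw [pvMset_flatMap]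
  have hfun : (fun p : Int × Int => pvMset [p, (p.1 + num, p.2), (p.1, p.2 + num)] e)
      = (fun p : Int × Int =>
        (if p.1 - p.2 = e then [p.1] else []) ++
        ((if p.1 - p.2 = e - num then [p.1 + num] else []) ++
          (if p.1 - p.2 = e + num then [p.1] else []))) := by
    funext p
    rw [show ([p, (p.1 + num, p.2), (p.1, p.2 + num)] : List (Int × Int))
        = [p] ++ ([(p.1 + num, p.2)] ++ [(p.1, p.2 + num)]) from rfl,
      pvMset_app, pvMset_app, pvMset_single, pvMset_single, pvMset_single]
    congr 1
    congr 1
    · exact if_congr (by dsimp only; omega) rfl rfl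
    · exact if_congr (by dsimp only; omega) rfl rfl
  rw [hfun, pvOmaxL_flatMap_append, pvOmaxL_flatMap_append,
    flatMap_ite_eq_map_mset r e (fun v => v),
    flatMap_ite_eq_map_mset r (e - num) (· + num),
    flatMap_ite_eq_map_mset r (e + num) (fun v => v), List.map_id',
    pvOmaxL_map_add, List.map_id']

theorem best_dp_inv (lst : List Int) :
    ∀ (dp : PySem.Dict Int Int) (r : List (Int × Int)),
    dp.keys.Nodup → (∀ e, dp.get? e = pvOmaxL (pvMset r e)) →
    (lst.foldl lc956BestStep dp).keys.Nodup ∧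
    ∀ e, (lst.foldl lc956BestStep dp).get? e
      = pvOmaxL (pvMset
          (lst.foldl (fun acc num => acc.flatMap (fun p => [p, (p.1 + num, p.2), (p.1, p.2 + num)])) r) e) := by
  induction lst with
  | nil => intro dp r hn h; exact ⟨hn, h⟩
  | cons num t ih =>
    intro dp r hn h
    rw [List.foldl_cons, List.foldl_cons]
    apply ih
    · exact bestStep_nodup dp num hn
    · intro e
      rw [bestStep_get? dp hn num e, reach_mset_step, h e, h (e - num), h (e + num)]

theorem clamp_get? (dp : PySem.Dict Int Int) (hn : dp.keys.Nodup) (k : Int) :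
    (dp.items.foldl (fun r dv => r.insert dv.1 (max dv.2 0)) PySem.Dict.empty).get? k
      = (dp.get? k).map (fun v => max v 0) := by
  have hkeys : (dp.items.map (fun dv : Int × Int => dv.1)).Nodup := hn
  have hitems := PySem.Dict.items_foldl_insert_fresh dp.items (fun dv : Int × Int => dv.1)
    (fun dv => max dv.2 0) PySem.Dict.empty
    (fun a _ => PySem.Dict.contains_empty _) hkeys
  have hknew : (dp.items.foldl (fun r dv => r.insert dv.1 (max dv.2 0)) PySem.Dict.empty).keys
      = dp.keys := by
    show List.map _ _ = _
    rw [hitems]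
    simp [PySem.Dict.keys]
    rfl
  have hnnew : (dp.items.foldl (fun r dv => r.insert dv.1 (max dv.2 0)) PySem.Dict.empty).keys.Nodup := by
    rw [hknew]; exact hn
  cases h : dp.get? k with
  | none =>
    rw [PySem.Dict.get?_eq_none_iff_not_mem_keys] at h
    rw [show Option.map (fun v => max v 0) (none : Option Int) = none from rfl,
      PySem.Dict.get?_eq_none_iff_not_mem_keys, hknew]
    exact h
  | some v =>
    have hmem : (k, v) ∈ dp.items := (PySem.Dict.get?_eq_some_iff_mem_items dp k v hn).mp h
    have : (k, max v 0) ∈ (dp.items.foldl (fun r dv => r.insert dv.1 (max dv.2 0)) PySem.Dict.empty).items := by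
      rw [hitems]
      simp only [List.mem_append, List.mem_map]
      exact Or.inr ⟨(k, v), hmem, rfl⟩
    rw [PySem.Dict.get?_of_mem_items _ this hnnew]
    rfl

theorem best_base_get? (e : Int) :
    (PySem.Dict.empty.insert (0 : Int) (0 : Int)).get? e = pvOmaxL (pvMset [(0, 0)] e) := by
  rw [PySem.Dict.get?_insert]
  by_cases h : e = 0
  · subst h
    rw [if_pos rfl, pvMset_single, if_pos (by dsimp only; omega)]
    rfl
  · rw [if_neg h, PySem.Dict.get?_empty, pvMset_single,
      if_neg (by dsimp only; omega)]
    rfl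

theorem best_get? (lst : List Int) (k : Int) :
    (lc956Best lst).get? k = (pvOmaxL (pvMset (pvReach lst) k)).map (fun v => max v 0) := by
  unfold lc956Best
  obtain ⟨hn, hg⟩ := best_dp_inv lst (PySem.Dict.empty.insert 0 0) [(0, 0)]
    (PySem.Dict.nodup_keys_insert _ _ _ PySem.Dict.nodup_keys_empty) best_base_get?
  rw [clamp_get? _ hn, hg k, pvReach]

theorem best_keys_nodup (lst : List Int) : (lc956Best lst).keys.Nodup := by
  unfold lc956Best
  obtain ⟨hn, _⟩ := best_dp_inv lst (PySem.Dict.empty.insert 0 0) [(0, 0)]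
    (PySem.Dict.nodup_keys_insert _ _ _ PySem.Dict.nodup_keys_empty) best_base_get?
  have hkeys : ((lst.foldl lc956BestStep (PySem.Dict.empty.insert 0 0)).items.map
      (fun dv : Int × Int => dv.1)).Nodup := hn
  have hitems := PySem.Dict.items_foldl_insert_fresh
    (lst.foldl lc956BestStep (PySem.Dict.empty.insert 0 0)).items (fun dv : Int × Int => dv.1)
    (fun dv => max dv.2 0) PySem.Dict.empty
    (fun a _ => PySem.Dict.contains_empty _) hkeys
  show (List.map _ _).Nodup
  rw [hitems]
  simpa [PySem.Dict.keys] using hn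

theorem check_eq_best_get? (lst : List Int) (k : Int) :
    (lc956Check lst).get? k = (lc956Best lst).get? k := by
  rw [check_get?, best_get?]
  congr 1
  funext M
  exact max_comm 0 M


theorem foldl_if_max {α : Type} (l : List α) (c : α → Bool) (g : α → Int) (a : Int) :
    l.foldl (fun ans x => if c x then max ans (g x) else ans) a
      = ((l.filter c).map g).foldl max a := by
  induction l generalizing a with
  | nil => rfl
  | cons x t ih =>
    rw [List.foldl_cons, List.filter_cons]
    cases h : c x
    · rw [if_neg (Bool.false_ne_true), if_neg (Bool.false_ne_true), ih]
    · rw [if_pos rfl, if_pos rfl, ih, List.map_cons, List.foldl_cons]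

theorem some_foldl_max (l : List Int) (a : Int) :
    some (l.foldl max a) = pvOmax (some a) (pvOmaxL l) := by
  induction l generalizing a with
  | nil => simp [pvOmaxL, pvOmax_none_right]
  | cons x t ih =>
    rw [List.foldl_cons, ih]
    have hstep : pvOmaxL (x :: t) = pvOmax (some x) (pvOmaxL t) := by
      rw [pvOmaxL, List.foldl_cons, pvOmaxL_go]; rfl
    rw [hstep, ← pvOmax_assoc]
    rfl

theorem foldl_max_eq_of_mem_iff (l₁ l₂ : List Int) (a : Int) (h : ∀ x, x ∈ l₁ ↔ x ∈ l₂) :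
    l₁.foldl max a = l₂.foldl max a := by
  have he := pvOmaxL_eq_of_mem_iff l₁ l₂ h
  have h1 := some_foldl_max l₁ a
  rw [he, ← some_foldl_max l₂ a] at h1
  exact Option.some.inj h1

theorem match_max_eq (o : Option Int) (ans v : Int) :
    (match o with | some w => max ans (v + w) | none => ans)
      = if o.isSome then max ans (v + o.getD 0) else ans := by
  cases o <;> rfl

theorem mem_keys_iff_isSome (d : PySem.Dict Int Int) (k : Int) :
    k ∈ d.keys ↔ (d.get? k).isSome := by
  rw [Option.isSome_iff_ne_none]
  constructor
  · intro hk hc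
    exact (PySem.Dict.get?_eq_none_iff_not_mem_keys d k).mp hc hk
  · intro hne
    by_contra hk
    exact hne ((PySem.Dict.get?_eq_none_iff_not_mem_keys d k).mpr hk)

-- ===== VERDICT (by name: the statement is the Claim_ definition above) =====
theorem lc_956_1_spec : Claim_equal_lc_956_1 := by
  intro rods _
  unfold Spec_lc_956_1 lc_956_1 lc_956_1_alt
  dsimp only
  set lsl := PySem.List.slice rods none (some (PySem.Int.floordiv (rods.length : Int) 2)) with hl
  set lsr := PySem.List.slice rods (some (PySem.Int.floordiv (rods.length : Int) 2)) none with hr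
  simp only [match_max_eq]
  rw [foldl_if_max, foldl_if_max]
  apply foldl_max_eq_of_mem_iff
  intro x
  simp only [List.mem_map, List.mem_filter]
  constructor
  · rintro ⟨k, ⟨hk, hc⟩, rfl⟩
    have h1 : ((lc956Check lsl).get? k).isSome := (mem_keys_iff_isSome _ k).mp hk
    obtain ⟨v, hv⟩ := Option.isSome_iff_exists.mp h1
    have hvb : (lc956Best lsl).get? k = some v := by rw [← check_eq_best_get?]; exact hv
    rw [PySem.Dict.contains_eq_isSome_get?] at hc
    obtain ⟨w, hw⟩ := Option.isSome_iff_exists.mp hc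
    have hwb : (lc956Best lsr).get? (-k) = some w := by rw [← check_eq_best_get?]; exact hw
    refine ⟨(k, v), ⟨(PySem.Dict.get?_eq_some_iff_mem_items _ _ _ (best_keys_nodup lsl)).mp hvb, ?_⟩, ?_⟩
    · dsimp only; rw [hwb]; rfl
    · dsimp only
      rw [PySem.Dict.getD_eq_get?_getD, PySem.Dict.getD_eq_get?_getD, hv, hw, hwb]
      rfl
  · rintro ⟨⟨k, v⟩, ⟨hm, hs⟩, rfl⟩
    dsimp only at hs ⊢
    have hvb : (lc956Best lsl).get? k = some v :=
      (PySem.Dict.get?_eq_some_iff_mem_items _ _ _ (best_keys_nodup lsl)).mpr hm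
    have hva : (lc956Check lsl).get? k = some v := by rw [check_eq_best_get?]; exact hvb
    obtain ⟨w, hw⟩ := Option.isSome_iff_exists.mp hs
    have hwa : (lc956Check lsr).get? (-k) = some w := by rw [check_eq_best_get?]; exact hw
    refine ⟨k, ⟨?_, ?_⟩, ?_⟩
    · rw [mem_keys_iff_isSome, hva]; rfl
    · rw [PySem.Dict.contains_eq_isSome_get?, hwa]; rfl
    · rw [PySem.Dict.getD_eq_get?_getD, PySem.Dict.getD_eq_get?_getD, hva, hwa, hw]
      rfl
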